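-- pv_equiv track=rewrite | github.com/PeterLuschny/Tabels | src/_tablutils.py | SeqToString
-- ===== SOURCE A (Python) =====
-- def SeqToString(seq: list[int], maxchars: int, maxterms: int, sep: str=' ', offset: int=0) -> str:
--     """
--     Converts a sequence of integers into a string representation.
--
--     Args:
--         seq (list[int]): The sequence of integers to be converted.
--         maxchars (int): The maximum length of the resulting string.
--         maxterms (int): The maximum number of terms included.
--         sep (string, optional): String seperator. Default is ' '.
--         offset (int, optional): The starting index of the sequence. Defaults to 0.
--
--     Returns:
--         str: The string representation of the sequence.
--
--     """
--     seqstr = ""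
--     maxt = maxl = 0
--     for trm in seq[offset:]:
--         maxt += 1
--         if maxt > maxterms:
--             break
--         s = str(trm) + sep
--         maxl += len(s)
--         if maxl > maxchars:
--             break
--         seqstr += s
--     return seqstr
-- ===== SOURCE B (Python) =====
-- def SeqToString(seq: list[int], maxchars: int, maxterms: int, sep: str = ' ', offset: int = 0) -> str:
--     # Phase 1: candidate pieces. At most maxterms terms (none if the cap is <= 0);
--     # also no more than maxchars//(len(sep)+1)+1 candidates, since each piece is
--     # at least len(sep)+1 characters long, so later pieces can never fit the budget.
--     limit = min(maxterms, maxchars // (len(sep) + 1) + 1)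
--     terms = seq[offset:][:limit if limit > 0 else 0]
--     pieces = [str(t) + sep for t in terms]
--     # Phase 2: prefix-length table (cumulative string length after each piece).
--     cums = []
--     total = 0
--     for p in pieces:
--         total += len(p)
--         cums.append(total)
--     # Phase 3: number of leading pieces whose cumulative length stays <= maxchars.
--     k = 0
--     while k < len(cums) and cums[k] <= maxchars:
--         k += 1
--     return ''.join(pieces[:k])
-- ===== Notes on version B (the rewrite author's own statement) =====
-- stated objective: alternative
-- what changed: Replaces A's single fused break-loop (running term and char counters) by three phases: slice out the candidate terms (capped by maxterms and by maxchars//(len(sep)+1)+1, since later pieces can never fit), build a prefix-length table of the rendered pieces, then cut the table at the first cumulative length exceeding maxchars and join that prefix.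
import Mathlib
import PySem

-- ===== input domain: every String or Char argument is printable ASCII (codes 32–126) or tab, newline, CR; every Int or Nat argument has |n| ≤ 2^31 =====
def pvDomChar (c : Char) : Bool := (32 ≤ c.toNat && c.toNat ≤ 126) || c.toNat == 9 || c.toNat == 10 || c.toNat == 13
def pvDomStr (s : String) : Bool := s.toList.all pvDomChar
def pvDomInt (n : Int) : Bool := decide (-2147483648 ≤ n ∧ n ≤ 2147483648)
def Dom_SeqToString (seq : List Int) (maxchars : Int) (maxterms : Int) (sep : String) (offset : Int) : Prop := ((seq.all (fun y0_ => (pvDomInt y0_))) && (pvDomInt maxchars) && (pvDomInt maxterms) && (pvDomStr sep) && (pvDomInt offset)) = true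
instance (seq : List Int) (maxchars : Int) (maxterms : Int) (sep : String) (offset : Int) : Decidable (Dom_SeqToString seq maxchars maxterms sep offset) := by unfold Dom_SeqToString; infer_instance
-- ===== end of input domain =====

-- B replaces A's fused break-loop by three phases (slice terms, prefix-length table, cut & join); alternative decomposition, same cost.

-- ===== PORT A =====
-- the for-loop of A, state (maxt, maxl, seqstr); strings handled as List Char
def pvALoop (maxchars maxterms : Int) (sep : List Char) :
    List Int → Int → Int → List Char → List Char
  | [], _, _, seqstr => seqstr
  | trm :: rest, maxt, maxl, seqstr =>
    let maxt' := maxt + 1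
    if maxt' > maxterms then seqstr
    else
      let s := PySem.Int.toChars trm ++ sep
      let maxl' := maxl + (s.length : Int)
      if maxl' > maxchars then seqstr
      else pvALoop maxchars maxterms sep rest maxt' maxl' (seqstr ++ s)

def SeqToString (seq : List Int) (maxchars : Int) (maxterms : Int) (sep : String) (offset : Int) : String :=
  String.ofList (pvALoop maxchars maxterms sep.toList (PySem.List.slice seq (some offset) none) 0 0 [])

-- ===== PORT B =====
-- Phase 2 helper: prefix-length table ('cums' in Source B), built by a fold carrying (cums, total)
def pvCums (pieces : List (List Char)) : List Int :=
  (pieces.foldl (fun (st : List Int × Int) p => (st.1 ++ [st.2 + (p.length : Int)], st.2 + (p.length : Int))) ([], 0)).1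

-- Phase 3 helper: the while-loop counting leading cums entries ≤ maxchars
def pvCutoff (maxchars : Int) : List Int → Nat
  | [] => 0
  | c :: cs => if c ≤ maxchars then pvCutoff maxchars cs + 1 else 0

def SeqToString_alt (seq : List Int) (maxchars : Int) (maxterms : Int) (sep : String) (offset : Int) : String :=
  -- limit = min(maxterms, maxchars // (len(sep)+1) + 1): each piece has length ≥ len(sep)+1
  let limit := min maxterms (PySem.Int.floordiv maxchars (PySem.Str.len sep + 1) + 1)
  let terms := PySem.List.slice (PySem.List.slice seq (some offset) none) none
      (some (if limit > 0 then limit else 0))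
  let pieces := terms.map (fun t => PySem.Int.toChars t ++ sep.toList)
  let cums := pvCums pieces
  let k := pvCutoff maxchars cums
  String.ofList (pieces.take k).flatten   -- ''.join(pieces[:k]) : empty-sep join is concatenation (exact)

-- ===== PRECONDITION & SPEC =====
def Spec_SeqToString (seq : List Int) (maxchars : Int) (maxterms : Int) (sep : String) (offset : Int) (out : String) : Prop := out = SeqToString_alt seq maxchars maxterms sep offset
instance (seq : List Int) (maxchars : Int) (maxterms : Int) (sep : String) (offset : Int) (out : String) : Decidable (Spec_SeqToString seq maxchars maxterms sep offset out) := by unfold Spec_SeqToString; infer_instance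

-- ===== CLAIM (what is proved, stated in full; the proofs are below) =====
def Claim_equal_SeqToString : Prop := ∀ (seq : List Int) (maxchars : Int) (maxterms : Int) (sep : String) (offset : Int), Dom_SeqToString seq maxchars maxterms sep offset → Spec_SeqToString seq maxchars maxterms sep offset (SeqToString seq maxchars maxterms sep offset)

-- ===== LEMMAS AND PROOFS =====

-- the common fused recursion both sides reduce to
def pvCore (maxchars : Int) (sep : List Char) : List Int → Int → List Char
  | [], _ => []
  | t :: rest, maxl =>
    let s := PySem.Int.toChars t ++ sep
    if maxl + (s.length : Int) > maxchars then []
    else s ++ pvCore maxchars sep rest (maxl + (s.length : Int))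

lemma pvALoop_eq_core (maxchars maxterms : Int) (sep : List Char) :
    ∀ (ts : List Int) (maxt maxl : Int) (acc : List Char),
      pvALoop maxchars maxterms sep ts maxt maxl acc
        = acc ++ pvCore maxchars sep (ts.take (maxterms - maxt).toNat) maxl := by
  intro ts
  induction ts with
  | nil => intro maxt maxl acc; simp [pvALoop, pvCore]
  | cons t rest ih =>
    intro maxt maxl acc
    by_cases h : maxt + 1 > maxterms
    · have h0 : (maxterms - maxt).toNat = 0 := by omega
      simp [pvALoop, h, h0, pvCore]
    · have h1 : (maxterms - maxt).toNat = (maxterms - (maxt + 1)).toNat + 1 := by omega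
      rw [h1]
      simp only [List.take_succ_cons, pvALoop, pvCore, h, if_false]
      by_cases h2 : maxchars < maxl + (((PySem.Int.toChars t).length : Int) + (sep.length : Int))
      · simp [h2]
      · simp [h2, ih]

lemma pvCums_foldl (pieces : List (List Char)) :
    ∀ (acc : List Int) (base : Int),
      (pieces.foldl (fun (st : List Int × Int) p => (st.1 ++ [st.2 + (p.length : Int)], st.2 + (p.length : Int))) (acc, base)).1
        = acc ++ (pieces.foldl (fun (st : List Int × Int) p => (st.1 ++ [st.2 + (p.length : Int)], st.2 + (p.length : Int))) ([], base)).1 := by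
  induction pieces with
  | nil => intro acc base; simp
  | cons p ps ih =>
    intro acc base
    simp only [List.foldl_cons]
    rw [ih, ih ([] ++ [base + (p.length : Int)])]
    simp

lemma pvB_phase (maxchars : Int) (sep : List Char) :
    ∀ (ts : List Int) (base : Int),
      ((ts.map (fun t => PySem.Int.toChars t ++ sep)).take
          (pvCutoff maxchars ((ts.map (fun t => PySem.Int.toChars t ++ sep)).foldl
            (fun (st : List Int × Int) p => (st.1 ++ [st.2 + (p.length : Int)], st.2 + (p.length : Int))) ([], base)).1)).flatten
        = pvCore maxchars sep ts base := by
  intro ts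
  induction ts with
  | nil => intro base; simp [pvCutoff, pvCore]
  | cons t rest ih =>
    intro base
    simp only [List.map_cons, List.foldl_cons]
    rw [pvCums_foldl]
    by_cases h : base + (((PySem.Int.toChars t).length : Int) + (sep.length : Int)) ≤ maxchars
    · simp only [pvCutoff, List.cons_append, List.nil_append, List.length_append,
        Nat.cast_add, h, if_pos]
      simp only [List.take_succ_cons, List.flatten_cons]
      rw [ih]
      have hlt : ¬ maxchars < base + (((PySem.Int.toChars t).length : Int) + (sep.length : Int)) := by omega
      simp [pvCore, hlt]
    · simp only [pvCutoff, List.cons_append, List.nil_append, List.length_append,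
        Nat.cast_add, h, if_false]
      have hgt : maxchars < base + (((PySem.Int.toChars t).length : Int) + (sep.length : Int)) := by omega
      simp [pvCore, hgt]

lemma take_maxterms (tail : List Int) (l : Int) :
    PySem.List.slice tail none (some (if l > 0 then l else 0)) = tail.take l.toNat := by
  by_cases h : l > 0
  · rw [if_pos h, PySem.List.slice_to tail (show (0:Int) ≤ l by omega)]
  · rw [if_neg h, PySem.List.slice_to tail (show (0:Int) ≤ 0 by omega)]
    have h0 : l.toNat = 0 := by omega
    rw [h0]
    norm_num

-- every rendered piece has at least one character: str(t) is never empty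
lemma toDigitsCore_len (b : Nat) :
    ∀ (fuel n : Nat) (ds : List Char), ds.length ≤ (Nat.toDigitsCore b fuel n ds).length := by
  intro fuel
  induction fuel with
  | zero => intro n ds; simp [Nat.toDigitsCore]
  | succ f ih =>
    intro n ds
    simp only [Nat.toDigitsCore]
    split
    · simp
    · exact le_trans (by simp) (ih _ _)

lemma toChars_len (t : Int) : 1 ≤ (PySem.Int.toChars t).length := by
  unfold PySem.Int.toChars
  split
  · simp
  · show 1 ≤ (Nat.toDigits 10 _).length
    unfold Nat.toDigits
    simp only [Nat.toDigitsCore]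
    split
    · simp
    · exact le_trans (by simp) (toDigitsCore_len 10 _ _ _)

-- pvCore never looks past the first maxchars/(len(sep)+1) + 1 terms
lemma pvCore_take (mc : Int) (sep : List Char) :
    ∀ (ts : List Int) (n : Nat) (base : Int),
      mc - base < (n : Int) * (1 + (sep.length : Int)) →
      pvCore mc sep (ts.take n) base = pvCore mc sep ts base := by
  intro ts
  induction ts with
  | nil => intro n base _; simp
  | cons t rest ih =>
    intro n base hn
    have hs : (1:Int) ≤ ((PySem.Int.toChars t).length : Int) := by exact_mod_cast toChars_len t
    have hsep : (0:Int) ≤ ((sep.length : Nat) : Int) := Int.natCast_nonneg _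
    cases n with
    | zero =>
      have hz : mc - base < 0 := by simpa using hn
      have hc : mc < base + (((PySem.Int.toChars t).length : Int) + (sep.length : Int)) := by omega
      simp [pvCore, hc]
    | succ m =>
      simp only [List.take_succ_cons, pvCore]
      by_cases hc : mc < base + (((PySem.Int.toChars t).length : Int) + (sep.length : Int))
      · simp [hc]
      · have hm : mc - (base + (((PySem.Int.toChars t).length : Int) + (sep.length : Int)))
            < (m : Int) * (1 + (sep.length : Int)) := by
          push_cast at hn ⊢; nlinarith
        simp only [List.length_append, Nat.cast_add, hc, if_false]
        rw [ih m _ hm]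

-- the two term caps agree: cutting at min(maxterms, maxchars // (len(sep)+1) + 1) loses nothing
lemma pvCore_cap (mc : Int) (sep : List Char) (tail : List Int) (mt : Int) :
    pvCore mc sep (tail.take (min mt (PySem.Int.floordiv mc ((sep.length : Int) + 1) + 1)).toNat) 0
      = pvCore mc sep (tail.take (mt - 0).toNat) 0 := by
  have hL : (0:Int) < (sep.length : Int) + 1 := by positivity
  set q := PySem.Int.floordiv mc ((sep.length : Int) + 1) with hq
  have hql : q * ((sep.length : Int) + 1) ≤ mc ∧ mc < (q + 1) * ((sep.length : Int) + 1) :=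
    (PySem.Int.floordiv_eq_iff_of_pos hL).mp hq.symm
  by_cases h : mt ≤ q + 1
  · have : (min mt (q + 1)).toNat = (mt - 0).toNat := by omega
    rw [this]
  · have key : ∀ (n : Nat), q + 1 ≤ (n : Int) → mc - 0 < (n : Int) * (1 + (sep.length : Int)) := by
      intro n hqn
      have h1 : (q + 1) * ((sep.length : Int) + 1) ≤ (n : Int) * ((sep.length : Int) + 1) :=
        mul_le_mul_of_nonneg_right hqn (by omega)
      have h2 : (n : Int) * ((sep.length : Int) + 1) = (n : Int) * (1 + (sep.length : Int)) := by ring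
      omega
    by_cases hq0 : q + 1 ≤ 0
    · have hmn : mc < 0 := by nlinarith [hql.2]
      have e1 : (min mt (q + 1)).toNat = 0 := by omega
      rw [e1, pvCore_take mc sep tail 0 0 (by simpa using hmn),
        pvCore_take mc sep tail (mt - 0).toNat 0 (by
          have hn0 : (0:Int) ≤ (((mt - 0).toNat : Nat) : Int) * (1 + (sep.length : Int)) := by positivity
          omega)]
    · have e1 : ((min mt (q + 1)).toNat : Int) = q + 1 := by omega
      have e2 : q + 1 ≤ ((mt - 0).toNat : Int) := by omega
      rw [pvCore_take mc sep tail _ 0 (key _ (le_of_eq e1.symm)),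
        pvCore_take mc sep tail _ 0 (key _ e2)]

-- ===== VERDICT (by name: the statement is the Claim_ definition above) =====
theorem SeqToString_spec : Claim_equal_SeqToString := by
  intro seq maxchars maxterms sep offset _
  unfold Spec_SeqToString SeqToString SeqToString_alt
  simp only [pvCums, take_maxterms, PySem.Str.len]
  rw [pvALoop_eq_core, pvB_phase maxchars sep.toList, pvCore_cap]
  simp
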